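-- pv_equiv track=rewrite | github.com/vishnuvrj7/passentropy | passentropy.py | calculate_character_diversity
-- ===== SOURCE A (Python) =====
-- from typing import Dict, List, Tuple, Set
--
-- def calculate_character_diversity(password: str) -> Dict[str, int]:
--     """Calculate character type diversity."""
--     diversity = {
--         'lowercase': 0,
--         'uppercase': 0,
--         'digits': 0,
--         'special': 0,
--         'unique_chars': 0
--     }
--
--     password_chars = set(password)
--     diversity['unique_chars'] = len(password_chars)
--
--     for char in password:
--         if char.islower():
--             diversity['lowercase'] += 1
--         elif char.isupper():
--             diversity['uppercase'] += 1
--         elif char.isdigit():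
--             diversity['digits'] += 1
--         else:
--             diversity['special'] += 1
--
--     return diversity
-- ===== SOURCE B (Python) =====
-- def calculate_character_diversity(password: str):
--     """Calculate character type diversity via a frequency table over distinct characters."""
--     counts = {}
--     for ch in password:
--         counts[ch] = counts.get(ch, 0) + 1
--     lowercase = uppercase = digits = special = 0
--     for ch, n in counts.items():
--         if ch.islower():
--             lowercase += n
--         elif ch.isupper():
--             uppercase += n
--         elif ch.isdigit():
--             digits += n
--         else:
--             special += n
--     return {
--         'lowercase': lowercase,
--         'uppercase': uppercase,
--         'digits': digits,
--         'special': special,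
--         'unique_chars': len(counts)
--     }
-- ===== Notes on version B (the rewrite author's own statement) =====
-- stated objective: alternative
-- what changed: B first builds a character frequency table in one pass, then classifies only the distinct characters (aggregating stored counts), instead of A's classify-every-character pass plus a separate set for uniqueness.
import Mathlib
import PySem

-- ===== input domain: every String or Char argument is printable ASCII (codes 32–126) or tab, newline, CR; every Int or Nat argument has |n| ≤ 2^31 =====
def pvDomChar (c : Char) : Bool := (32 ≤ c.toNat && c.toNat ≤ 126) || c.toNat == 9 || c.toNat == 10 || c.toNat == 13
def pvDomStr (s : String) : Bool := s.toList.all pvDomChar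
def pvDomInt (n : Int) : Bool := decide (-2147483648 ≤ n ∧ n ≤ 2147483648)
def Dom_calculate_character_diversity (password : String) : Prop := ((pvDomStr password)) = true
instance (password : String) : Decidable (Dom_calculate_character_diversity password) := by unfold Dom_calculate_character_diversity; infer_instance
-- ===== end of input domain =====

-- B builds a frequency table first and classifies only the distinct characters, weighting by counts; alternative traversal, same totals.

-- ===== PORT A =====
def calculate_character_diversity (password : String) : List (String × Int) :=
  let diversity : PySem.Dict String Int :=
    PySem.Dict.ofList [("lowercase", 0), ("uppercase", 0), ("digits", 0), ("special", 0), ("unique_chars", 0)]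
  let password_chars : PySem.Set Char := PySem.Set.ofList password.toList
  let diversity := diversity.insert "unique_chars" (PySem.Set.len password_chars)
  let diversity := password.toList.foldl (fun d char =>
    if PySem.Chars.islower char then d.insert "lowercase" (d.getD "lowercase" 0 + 1)
    else if PySem.Chars.isupper char then d.insert "uppercase" (d.getD "uppercase" 0 + 1)
    else if PySem.Chars.isdigit char then d.insert "digits" (d.getD "digits" 0 + 1)
    else d.insert "special" (d.getD "special" 0 + 1)) diversity
  diversity.items

-- ===== PORT B =====
def calculate_character_diversity_alt (password : String) : List (String × Int) :=
  let counts : PySem.Dict Char Int :=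
    password.toList.foldl (fun d ch => d.insert ch (d.getD ch 0 + 1)) PySem.Dict.empty
  let s := counts.items.foldl (fun (s : Int × Int × Int × Int) kv =>
    if PySem.Chars.islower kv.1 then (s.1 + kv.2, s.2.1, s.2.2.1, s.2.2.2)
    else if PySem.Chars.isupper kv.1 then (s.1, s.2.1 + kv.2, s.2.2.1, s.2.2.2)
    else if PySem.Chars.isdigit kv.1 then (s.1, s.2.1, s.2.2.1 + kv.2, s.2.2.2)
    else (s.1, s.2.1, s.2.2.1, s.2.2.2 + kv.2)) (0, 0, 0, 0)
  [("lowercase", s.1), ("uppercase", s.2.1), ("digits", s.2.2.1), ("special", s.2.2.2),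
   ("unique_chars", counts.size)]

-- ===== PRECONDITION & SPEC =====
def Spec_calculate_character_diversity (password : String) (out : List (String × Int)) : Prop := out = calculate_character_diversity_alt password
instance (password : String) (out : List (String × Int)) : Decidable (Spec_calculate_character_diversity password out) := by unfold Spec_calculate_character_diversity; infer_instance

-- ===== CLAIM (what is proved, stated in full; the proofs are below) =====
def Claim_equal_calculate_character_diversity : Prop := ∀ (password : String), Dom_calculate_character_diversity password → Spec_calculate_character_diversity password (calculate_character_diversity password)

-- ===== LEMMAS AND PROOFS =====

def pvMk5 (a b c d u : Int) : PySem.Dict String Int :=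
  PySem.Dict.mk [("lowercase", a), ("uppercase", b), ("digits", c), ("special", d), ("unique_chars", u)]

lemma pvMk5_congr {a b c d u a' b' c' d' u' : Int} (h1 : a = a') (h2 : b = b') (h3 : c = c')
    (h4 : d = d') (h5 : u = u') : pvMk5 a b c d u = pvMk5 a' b' c' d' u' := by
  subst h1 h2 h3 h4 h5; rfl

def pvAstep (d : PySem.Dict String Int) (char : Char) : PySem.Dict String Int :=
  if PySem.Chars.islower char then d.insert "lowercase" (d.getD "lowercase" 0 + 1)
  else if PySem.Chars.isupper char then d.insert "uppercase" (d.getD "uppercase" 0 + 1)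
  else if PySem.Chars.isdigit char then d.insert "digits" (d.getD "digits" 0 + 1)
  else d.insert "special" (d.getD "special" 0 + 1)

lemma pvAstep_mk5 (x : Char) (a b c d u : Int) :
    pvAstep (pvMk5 a b c d u) x =
      if PySem.Chars.islower x then pvMk5 (a + 1) b c d u
      else if PySem.Chars.isupper x then pvMk5 a (b + 1) c d u
      else if PySem.Chars.isdigit x then pvMk5 a b (c + 1) d u
      else pvMk5 a b c (d + 1) u := by
  unfold pvAstep
  split_ifs <;> rfl

-- Int-valued count of characters satisfying p
def pvCntI (p : Char → Bool) : List Char → Int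
  | [] => 0
  | x :: t => (if p x then 1 else 0) + pvCntI p t

lemma pvCntI_eq (p : Char → Bool) (l : List Char) : pvCntI p l = (l.countP p : Int) := by
  induction l with
  | nil => rfl
  | cons x t ih =>
    by_cases h : p x <;> simp [pvCntI, List.countP_cons, h, ih] <;> try omega

lemma pvA_loop (l : List Char) : ∀ (a b c d u : Int),
    l.foldl pvAstep (pvMk5 a b c d u) =
      pvMk5 (a + pvCntI PySem.Chars.islower l)
            (b + pvCntI (fun c => !PySem.Chars.islower c && PySem.Chars.isupper c) l)
            (c + pvCntI (fun c => !PySem.Chars.islower c && !PySem.Chars.isupper c && PySem.Chars.isdigit c) l)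
            (d + pvCntI (fun c => !PySem.Chars.islower c && !PySem.Chars.isupper c && !PySem.Chars.isdigit c) l)
            u := by
  induction l with
  | nil => intro a b c d u; simp [pvCntI]
  | cons x t ih =>
    intro a b c d u
    rw [List.foldl_cons, pvAstep_mk5]
    split_ifs with h1 h2 h3 <;>
      (rw [ih]; apply pvMk5_congr <;> simp [pvCntI, *] <;> ring)

lemma pvSplit_count (p : Char → Bool) (k : Char) (l : List Char) :
    l.countP p = (if p k then l.count k else 0) + (l.filter (fun x => decide (x ≠ k))).countP p := by
  induction l with
  | nil => simp
  | cons x t ih =>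
    by_cases hx : x = k
    · subst hx
      by_cases hp : p x <;> simp [List.countP_cons, List.count_cons, List.filter_cons, hp, ih] <;> omega
    · by_cases hp : p x <;>
        simp [List.countP_cons, List.count_cons, List.filter_cons, hx, hp, ih] <;> omega

lemma pvCount_filter_ne (k k' : Char) (h : k' ≠ k) (l : List Char) :
    (l.filter (fun x => decide (x ≠ k))).count k' = l.count k' := by
  induction l with
  | nil => rfl
  | cons x t ih =>
    by_cases hx : x = k
    · subst hx
      rw [List.filter_cons_of_neg (by simp), ih]
      simp [List.count_cons, Ne.symm h]
    · rw [List.filter_cons_of_pos (by simp [hx])]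
      simp only [List.count_cons, ih]

lemma pvSum_count (p : Char → Bool) :
    ∀ (ks l : List Char), ks.Nodup → (∀ x ∈ l, x ∈ ks) →
      (ks.map (fun k => if p k then (l.count k : Int) else 0)).sum = (l.countP p : Int) := by
  intro ks
  induction ks with
  | nil =>
    intro l _ hcov
    have hle : l = [] := by
      cases l with
      | nil => rfl
      | cons y t => exact absurd (hcov y (by simp)) (by simp)
    simp [hle]
  | cons k t ih =>
    intro l hnd hcov
    have hkt : k ∉ t := (List.nodup_cons.1 hnd).1
    have hndt : t.Nodup := (List.nodup_cons.1 hnd).2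
    set l' := l.filter (fun x => decide (x ≠ k)) with hl'
    have hmapeq : t.map (fun k' => if p k' then (l.count k' : Int) else 0)
        = t.map (fun k' => if p k' then (l'.count k' : Int) else 0) := by
      apply List.map_congr_left
      intro k' hk'
      have hne : k' ≠ k := fun he => hkt (he ▸ hk')
      rw [hl', pvCount_filter_ne k k' hne]
    have hcov' : ∀ x ∈ l', x ∈ t := by
      intro x hx
      rw [hl', List.mem_filter] at hx
      rcases List.mem_cons.1 (hcov x hx.1) with he | ht
      · exact absurd he (by simpa using hx.2)
      · exact ht
    rw [List.map_cons, List.sum_cons, hmapeq, ih l' hndt hcov', pvSplit_count p k l]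
    push_cast
    split_ifs <;> ring

def pvBstep (s : Int × Int × Int × Int) (kv : Char × Int) : Int × Int × Int × Int :=
  if PySem.Chars.islower kv.1 then (s.1 + kv.2, s.2.1, s.2.2.1, s.2.2.2)
  else if PySem.Chars.isupper kv.1 then (s.1, s.2.1 + kv.2, s.2.2.1, s.2.2.2)
  else if PySem.Chars.isdigit kv.1 then (s.1, s.2.1, s.2.2.1 + kv.2, s.2.2.2)
  else (s.1, s.2.1, s.2.2.1, s.2.2.2 + kv.2)

lemma pvBstep_pair (a b c d : Int) (k : Char) (v : Int) :
    pvBstep (a, b, c, d) (k, v) =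
      if PySem.Chars.islower k then (a + v, b, c, d)
      else if PySem.Chars.isupper k then (a, b + v, c, d)
      else if PySem.Chars.isdigit k then (a, b, c + v, d)
      else (a, b, c, d + v) := by
  unfold pvBstep
  split_ifs <;> rfl

lemma pvB_loop (w : Char → Int) (ks : List Char) : ∀ (a b c d : Int),
    ks.foldl (fun s k => pvBstep s (k, w k)) (a, b, c, d) =
      (a + (ks.map (fun k => if PySem.Chars.islower k then w k else 0)).sum,
       b + (ks.map (fun k => if !PySem.Chars.islower k && PySem.Chars.isupper k then w k else 0)).sum,
       c + (ks.map (fun k => if !PySem.Chars.islower k && !PySem.Chars.isupper k && PySem.Chars.isdigit k then w k else 0)).sum,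
       d + (ks.map (fun k => if !PySem.Chars.islower k && !PySem.Chars.isupper k && !PySem.Chars.isdigit k then w k else 0)).sum) := by
  induction ks with
  | nil => intro a b c d; simp
  | cons k t ih =>
    intro a b c d
    rw [List.foldl_cons, pvBstep_pair]
    split_ifs with h1 h2 h3 <;>
      (rw [ih]; simp [Prod.ext_iff, List.map_cons, List.sum_cons, *] <;> try ring)

-- ===== VERDICT (by name: the statement is the Claim_ definition above) =====
theorem calculate_character_diversity_spec : Claim_equal_calculate_character_diversity := by
  intro password _
  unfold Spec_calculate_character_diversity
  unfold calculate_character_diversity calculate_character_diversity_alt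
  set l := password.toList with hl
  have hinit : (PySem.Dict.ofList [("lowercase", (0:Int)), ("uppercase", 0), ("digits", 0), ("special", 0), ("unique_chars", 0)]).insert "unique_chars" (PySem.Set.len (PySem.Set.ofList l)) = pvMk5 0 0 0 0 (PySem.Set.len (PySem.Set.ofList l)) := by rfl
  have hstep : (fun (d : PySem.Dict String Int) char =>
      if PySem.Chars.islower char then d.insert "lowercase" (d.getD "lowercase" 0 + 1)
      else if PySem.Chars.isupper char then d.insert "uppercase" (d.getD "uppercase" 0 + 1)
      else if PySem.Chars.isdigit char then d.insert "digits" (d.getD "digits" 0 + 1)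
      else d.insert "special" (d.getD "special" 0 + 1)) = pvAstep := rfl
  simp only [hinit, hstep]
  rw [pvA_loop]
  -- B side
  rw [show (fun (d : PySem.Dict Char Int) ch => d.insert ch (d.getD ch 0 + 1)) = (fun d x => d.insert x (d.getD x 0 + 1)) from rfl,
     PySem.Dict.foldl_insert_getD_add_one_eq_counter]
  rw [PySem.Dict.items_counter]
  rw [show (fun (s : Int × Int × Int × Int) (kv : Char × Int) =>
      if PySem.Chars.islower kv.1 then (s.1 + kv.2, s.2.1, s.2.2.1, s.2.2.2)
      else if PySem.Chars.isupper kv.1 then (s.1, s.2.1 + kv.2, s.2.2.1, s.2.2.2)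
      else if PySem.Chars.isdigit kv.1 then (s.1, s.2.1, s.2.2.1 + kv.2, s.2.2.2)
      else (s.1, s.2.1, s.2.2.1, s.2.2.2 + kv.2)) = pvBstep from rfl]
  rw [List.foldl_map]
  rw [pvB_loop (fun k => (l.count k : Int)) (PySem.Set.ofList l)]
  have hnd : (PySem.Set.ofList l).Nodup := PySem.Set.nodup_ofList l
  have hcov : ∀ x ∈ l, x ∈ PySem.Set.ofList l := fun x hx => (PySem.Set.mem_ofList l x).2 hx
  rw [pvSum_count PySem.Chars.islower _ l hnd hcov,
      pvSum_count (fun c => !PySem.Chars.islower c && PySem.Chars.isupper c) _ l hnd hcov,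
      pvSum_count (fun c => !PySem.Chars.islower c && !PySem.Chars.isupper c && PySem.Chars.isdigit c) _ l hnd hcov,
      pvSum_count (fun c => !PySem.Chars.islower c && !PySem.Chars.isupper c && !PySem.Chars.isdigit c) _ l hnd hcov]
  have hsize : (PySem.Dict.counter l).size = PySem.Set.len (PySem.Set.ofList l) := by
    simp [PySem.Dict.size, PySem.Dict.items_counter, PySem.Set.len]
  simp [pvMk5, PySem.Dict.items, pvCntI_eq, hsize]
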